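-- pv_equiv track=rewrite | github.com/znuxor/kryptos | dec_4_grid64.py | recursive_rotate
-- ===== SOURCE A (Python) =====
-- from copy import deepcopy
--
-- def rotate(p_text, row_number, col_number):
--     ''' returns a rotate string'''
--     # cut into matrix
--     matrix = []
--     for row_num in range(row_number):
--         matrix.append(list(p_text[row_num*col_number:(row_num+1)*col_number]))
--     # rotate
--     matrix = zip(*matrix[::-1])
--
--     # restring
--     ret_text = ''
--     for line in matrix:
--         ret_text += ''.join(line)
--     return ret_text
--
-- def recursive_rotate(ptext, remaining_combos):
--     ''' Returns a list of all possible rotate tree results'''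
--     rotated_texts = []
--     for i, a_combo in enumerate(remaining_combos):
--         work_text = deepcopy(ptext)
--         work_text = rotate(work_text, a_combo[0], a_combo[1])
--         rotated_texts.append(deepcopy(work_text))
--         rotated_texts.extend(recursive_rotate(
--             work_text, remaining_combos[:i]+remaining_combos[i+1:]))
--
--         # reversed combo
--         work_text = deepcopy(ptext)
--         work_text = rotate(work_text, a_combo[1], a_combo[0])
--         rotated_texts.append(deepcopy(work_text))
--         rotated_texts.extend(recursive_rotate(
--             work_text, remaining_combos[:i]+remaining_combos[i+1:]))
--     return rotated_texts
-- ===== SOURCE B (Python) =====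
-- def rotate(p_text, row_number, col_number):
--     # rows in reversed order, as string slices; emit column-wise
--     rws = [p_text[r * col_number:(r + 1) * col_number] for r in reversed(range(row_number))]
--     if not rws:
--         return ''
--     m = min(len(r) for r in rws)
--     return ''.join(rws[k][j] for j in range(m) for k in range(len(rws)))
--
--
-- def _children(text, rem):
--     ch = []
--     for i, combo in enumerate(rem):
--         rest = rem[:i] + rem[i + 1:]
--         ch.append((rotate(text, combo[0], combo[1]), rest))
--         ch.append((rotate(text, combo[1], combo[0]), rest))
--     return ch
--
--
-- def recursive_rotate(ptext, remaining_combos):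
--     ''' Returns a list of all possible rotate tree results'''
--     out = []
--     stack = list(reversed(_children(ptext, remaining_combos)))
--     while stack:
--         text, rem = stack.pop()
--         out.append(text)
--         stack.extend(reversed(_children(text, rem)))
--     return out
-- ===== Notes on version B (the rewrite author's own statement) =====
-- stated objective: alternative
-- what changed: B replaces A's recursion over the rotation tree with an explicit-stack preorder traversal over (text, remaining_combos) nodes, and rebuilds each rotation column-wise from reversed row slices instead of A's matrix/zip transpose.
import Mathlib
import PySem

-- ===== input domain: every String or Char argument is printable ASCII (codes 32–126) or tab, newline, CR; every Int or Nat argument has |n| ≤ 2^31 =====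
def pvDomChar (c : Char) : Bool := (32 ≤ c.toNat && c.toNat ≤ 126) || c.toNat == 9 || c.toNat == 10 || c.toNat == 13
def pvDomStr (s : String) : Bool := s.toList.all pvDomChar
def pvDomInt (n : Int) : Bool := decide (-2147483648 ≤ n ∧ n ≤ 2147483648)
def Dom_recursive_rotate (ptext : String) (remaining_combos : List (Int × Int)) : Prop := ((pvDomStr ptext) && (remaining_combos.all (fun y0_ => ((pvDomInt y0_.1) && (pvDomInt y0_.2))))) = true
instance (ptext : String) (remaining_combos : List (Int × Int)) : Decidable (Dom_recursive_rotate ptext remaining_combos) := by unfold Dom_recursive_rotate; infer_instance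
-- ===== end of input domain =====

-- B replaces A's recursion over the rotation tree by an explicit-stack preorder
-- traversal (and emits each rotation column-wise instead of matrix-zip); objective:
-- alternative decomposition, not speed.

-- ===== PORT A =====

-- zip(*rows): truncating transpose, exactly Python's zip over the row iterators
def pyZipStar : List (List Char) → List (List Char)
  | [] => []
  | r :: rs =>
    if h : (r :: rs).all (fun l => !l.isEmpty) then
      ((r :: rs).map (fun l => l.headI)) :: pyZipStar ((r :: rs).map (fun l => l.tail))
    else []
termination_by l => l.headI.length
decreasing_by
  simp only [List.all_cons, List.map_cons, List.headI, Bool.and_eq_true] at h ⊢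
  cases r with
  | nil => simp at h
  | cons a t => simp

def rotateA (p_text : String) (row_number col_number : Int) : String :=
  -- matrix = [list(p_text[r*col:(r+1)*col]) for r in range(row_number)]
  let matrix := (PySem.List.pyRange 0 row_number 1).map
    (fun r => PySem.List.slice p_text.toList (some (r * col_number)) (some ((r + 1) * col_number)))
  -- matrix = zip(*matrix[::-1]); then concatenate the lines
  let rot := pyZipStar matrix.reverse
  String.ofList (rot.foldl (fun acc line => acc ++ line) [])

-- (cited by rrGoA's termination proof)
theorem pvRestLength (cs : List (Int × Int)) (i : Nat) (h : i < cs.length) :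
    (PySem.List.slice cs none (some (i : Int)) ++ PySem.List.slice cs (some ((i : Int) + 1)) none).length
      = cs.length - 1 := by
  have h1 : ((i : Int) + 1) = (((i + 1 : Nat) : Int)) := by push_cast; ring
  rw [PySem.List.slice_to_natCast, h1, PySem.List.slice_from_natCast]
  simp; omega

-- the 'for i, a_combo in enumerate(remaining_combos)' loop, from index i upward
def rrGoA (ptext : String) (cs : List (Int × Int)) (i : Nat) : List String :=
  if h : i < cs.length then
    let a_combo := cs[i]
    let rest := PySem.List.slice cs none (some (i : Int)) ++ PySem.List.slice cs (some ((i : Int) + 1)) none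
    let w1 := rotateA ptext a_combo.1 a_combo.2
    let w2 := rotateA ptext a_combo.2 a_combo.1
    w1 :: (rrGoA w1 rest 0 ++ (w2 :: (rrGoA w2 rest 0 ++ rrGoA ptext cs (i + 1))))
  else []
termination_by (cs.length, cs.length - i)
decreasing_by
  · apply Prod.Lex.left; rw [pvRestLength cs i h]; omega
  · apply Prod.Lex.left; rw [pvRestLength cs i h]; omega
  · apply Prod.Lex.right; omega

def recursive_rotate (ptext : String) (remaining_combos : List (Int × Int)) : List String :=
  rrGoA ptext remaining_combos 0

-- ===== PORT B =====

def rotateB (p_text : String) (row_number col_number : Int) : String :=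
  -- rws = [p_text[r*col:(r+1)*col] for r in reversed(range(row_number))]
  let rws := ((PySem.List.pyRange 0 row_number 1).reverse).map
    (fun r => PySem.List.slice p_text.toList (some (r * col_number)) (some ((r + 1) * col_number)))
  match rws with
  | [] => ""
  | r0 :: rest =>
    -- m = min(len(r) for r in rws)
    let m := rest.foldl (fun acc l => min acc l.length) r0.length
    -- ''.join(rws[k][j] for j in range(m) for k in range(len(rws)));
    -- getD is exact here: j < m ≤ len(rws[k]) for every k
    String.ofList ((List.range m).flatMap (fun j => (r0 :: rest).map (fun rw => rw.getD j ' ')))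

-- _children(text, rem): the 2·len(rem) stack entries, in natural (pop) order
def childrenB (text : String) (rem : List (Int × Int)) : List (String × List (Int × Int)) :=
  (PySem.List.enumerate rem).flatMap (fun p =>
    let rest := PySem.List.slice rem none (some p.1) ++ PySem.List.slice rem (some (p.1 + 1)) none
    [(rotateB text p.2.1 p.2.2, rest), (rotateB text p.2.2 p.2.1, rest)])

-- termination measure for the stack loop: total node count of the pending subtrees
def pvNodeCount : Nat → Nat
  | 0 => 0
  | n + 1 => 2 * (n + 1) * (1 + pvNodeCount n)

def pvStackWeight (stack : List (String × List (Int × Int))) : Nat :=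
  (stack.map (fun e => 1 + pvNodeCount e.2.length)).sum

-- (cited by rrStack's termination proof, via pvWeightChildren)
theorem pvSumFlatMap {α β : Type} (l : List α) (f : α → List β) (g : β → Nat) :
    ((l.flatMap f).map g).sum = (l.map (fun x => ((f x).map g).sum)).sum := by
  induction l with
  | nil => rfl
  | cons a t ih => simp [ih]

-- (cited by rrStack's termination proof)
theorem pvWeightChildren (t : String) (rem : List (Int × Int)) :
    pvStackWeight (childrenB t rem) = pvNodeCount rem.length := by
  unfold pvStackWeight childrenB
  rw [pvSumFlatMap]
  rw [List.map_congr_left (g := fun _ => 2 * (1 + pvNodeCount (rem.length - 1))) ?_]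
  · rw [List.map_const', List.sum_replicate_nat, PySem.List.length_enumerate]
    cases rem with
    | nil => rfl
    | cons c cst => simp [pvNodeCount]; ring
  · intro p hp
    rw [PySem.List.mem_enumerate_iff] at hp
    obtain ⟨k, hk, rfl⟩ := hp
    have hz : ((0 : Int) + (k : Nat)) = ((k : Nat) : Int) := by ring
    simp only [hz]
    have hl := pvRestLength rem k hk
    simp only [List.map_cons, List.map_nil, List.sum_cons, List.sum_nil, hl]
    omega

-- the 'while stack:' loop; the Lean list head is the Python stack top (end of list),
-- so extending with reversed(children) then popping = prepending children in order
def rrStack : List (String × List (Int × Int)) → List String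
  | [] => []
  | (t, rem) :: rest => t :: rrStack (childrenB t rem ++ rest)
termination_by stack => pvStackWeight stack
decreasing_by
  simp only [pvStackWeight, List.map_append, List.sum_append, List.map_cons, List.sum_cons]
  have := pvWeightChildren t rem
  simp only [pvStackWeight] at this
  omega

def recursive_rotate_alt (ptext : String) (remaining_combos : List (Int × Int)) : List String :=
  rrStack (childrenB ptext remaining_combos)

-- ===== PRECONDITION & SPEC =====
def Spec_recursive_rotate (ptext : String) (remaining_combos : List (Int × Int)) (out : List String) : Prop := out = recursive_rotate_alt ptext remaining_combos
instance (ptext : String) (remaining_combos : List (Int × Int)) (out : List String) : Decidable (Spec_recursive_rotate ptext remaining_combos out) := by unfold Spec_recursive_rotate; infer_instance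

-- ===== CLAIM (what is proved, stated in full; the proofs are below) =====
def Claim_equal_recursive_rotate : Prop := ∀ (ptext : String) (remaining_combos : List (Int × Int)), Dom_recursive_rotate ptext remaining_combos → Spec_recursive_rotate ptext remaining_combos (recursive_rotate ptext remaining_combos)

-- ===== LEMMAS AND PROOFS =====

theorem pvFoldMin_le (rest : List (List Char)) (acc : Nat) :
    rest.foldl (fun a l => min a l.length) acc ≤ acc := by
  induction rest generalizing acc with
  | nil => simp
  | cons l t ih => exact le_trans (ih _) (Nat.min_le_left _ _)

theorem pvFoldMin_zero (rest : List (List Char)) (acc : Nat) (h : ∃ l ∈ rest, l = []) :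
    rest.foldl (fun a l => min a l.length) acc = 0 := by
  induction rest generalizing acc with
  | nil => simp at h
  | cons l t ih =>
    obtain ⟨l', hl', rfl⟩ := h
    rcases List.mem_cons.mp hl' with h1 | h1
    · subst h1
      simp only [List.foldl_cons, List.length_nil, Nat.min_zero]
      exact Nat.le_zero.mp (pvFoldMin_le t 0)
    · exact ih _ ⟨[], h1, rfl⟩

theorem pvFoldMin_pos (rest : List (List Char)) (acc : Nat) (hacc : 0 < acc)
    (h : ∀ l ∈ rest, l ≠ []) : 0 < rest.foldl (fun a l => min a l.length) acc := by
  induction rest generalizing acc with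
  | nil => simpa
  | cons l t ih =>
    have hl : l ≠ [] := h l (by simp)
    have : 0 < l.length := List.length_pos_iff.mpr hl
    exact ih _ (lt_min hacc this) (fun x hx => h x (by simp [hx]))

theorem pvFoldMin_tail (rest : List (List Char)) (acc : Nat) (h : ∀ l ∈ rest, l ≠ []) :
    (rest.map (fun l => l.tail)).foldl (fun a l => min a l.length) (acc - 1)
      = rest.foldl (fun a l => min a l.length) acc - 1 := by
  induction rest generalizing acc with
  | nil => rfl
  | cons l t ih =>
    have hl : 0 < l.length := List.length_pos_iff.mpr (h l (by simp))
    simp only [List.map_cons, List.foldl_cons, List.length_tail]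
    rw [show min (acc - 1) (l.length - 1) = min acc l.length - 1 by omega]
    exact ih _ (fun x hx => h x (by simp [hx]))

theorem pvGetD_succ (l : List Char) (j : Nat) (d : Char) : l.getD (j + 1) d = l.tail.getD j d := by
  cases l <;> simp

theorem pvZipStar_eq_aux : ∀ (n : Nat) (r0 : List Char) (rest : List (List Char)), r0.length ≤ n →
    pyZipStar (r0 :: rest) = (List.range (rest.foldl (fun a l => min a l.length) r0.length)).map
      (fun j => (r0 :: rest).map (fun l => l.getD j ' ')) := by
  intro n
  induction n with
  | zero =>
    intro r0 rest h0
    have hr0 : r0 = [] := List.length_eq_zero_iff.mp (by omega)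
    subst hr0
    rw [pyZipStar, dif_neg (by simp)]
    have hm : rest.foldl (fun a l => min a l.length) 0 = 0 :=
      Nat.le_zero.mp (pvFoldMin_le rest 0)
    simp [hm]
  | succ n ih =>
    intro r0 rest hle
    by_cases hall : (r0 :: rest).all (fun l => !l.isEmpty)
    · have hne : ∀ l ∈ r0 :: rest, l ≠ [] := by
        intro l hl
        have := List.all_eq_true.mp hall l hl
        simpa [List.isEmpty_iff] using this
      have hr0 : r0 ≠ [] := hne r0 (by simp)
      have hr0p : 0 < r0.length := List.length_pos_iff.mpr hr0
      rw [pyZipStar, dif_pos hall]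
      simp only [List.map_cons]
      have htail : r0.tail.length ≤ n := by
        rw [List.length_tail]; omega
      rw [ih r0.tail (rest.map (fun l => l.tail)) htail]
      -- min over the tails is min over the rows minus one
      have hmt : (rest.map (fun l => l.tail)).foldl (fun a l => min a l.length) r0.tail.length
          = rest.foldl (fun a l => min a l.length) r0.length - 1 := by
        rw [List.length_tail]
        exact pvFoldMin_tail rest r0.length (fun x hx => hne x (by simp [hx]))
      have hmpos : 0 < rest.foldl (fun a l => min a l.length) r0.length :=
        pvFoldMin_pos rest r0.length hr0p (fun x hx => hne x (by simp [hx]))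
      obtain ⟨k, hk⟩ : ∃ k, rest.foldl (fun a l => min a l.length) r0.length = k + 1 :=
        ⟨_, (Nat.succ_pred_eq_of_pos hmpos).symm⟩
      rw [hmt, hk, Nat.add_sub_cancel, List.range_succ_eq_map, List.map_cons]
      congr 1
      · -- column 0 is the heads
        have h0 : ∀ l ∈ r0 :: rest, l.headI = l.getD 0 ' ' := by
          intro l hl
          cases l with
          | nil => exact absurd rfl (hne _ hl)
          | cons a t => rfl
        simpa using List.map_congr_left h0
      · -- later columns read through the tails
        rw [List.map_map]
        refine List.map_congr_left ?_
        intro j _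
        simp only [Function.comp, Nat.succ_eq_add_one, List.map_cons, List.map_map]
        refine congrArg₂ _ ((pvGetD_succ r0 j ' ').symm) ?_
        refine List.map_congr_left ?_
        intro l _
        show l.tail.getD j ' ' = l.getD (j + 1) ' '
        exact (pvGetD_succ l j ' ').symm
    · rw [pyZipStar, dif_neg hall]
      have hm : rest.foldl (fun a l => min a l.length) r0.length = 0 := by
        simp only [List.all_cons, Bool.and_eq_true, Bool.not_eq_eq_eq_not, Bool.not_true] at hall
        rw [Classical.not_and_iff_not_or_not] at hall
        rcases hall with h1 | h2
        · have : r0 = [] := by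
            rcases r0 with _ | _
            · rfl
            · simp at h1
          subst this
          exact Nat.le_zero.mp (pvFoldMin_le rest 0)
        · apply pvFoldMin_zero
          rw [List.all_eq_true] at h2
          push Not at h2
          obtain ⟨l, hl, he⟩ := h2
          refine ⟨l, hl, ?_⟩
          simpa [List.isEmpty_iff] using he
      rw [hm]
      rfl

theorem pvZipStar_eq (r0 : List Char) (rest : List (List Char)) :
    pyZipStar (r0 :: rest) = (List.range (rest.foldl (fun a l => min a l.length) r0.length)).map
      (fun j => (r0 :: rest).map (fun l => l.getD j ' ')) :=
  pvZipStar_eq_aux r0.length r0 rest le_rfl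

theorem rotate_eq (p : String) (r c : Int) : rotateA p r c = rotateB p r c := by
  simp only [rotateA, rotateB]
  rw [← List.map_reverse]
  rcases hrv : (PySem.List.pyRange 0 r 1).reverse.map
      (fun r => PySem.List.slice p.toList (some (r * c)) (some ((r + 1) * c))) with _ | ⟨r0, rest⟩
  · rw [pyZipStar]
    rfl
  · rw [PySem.List.foldl_append_eq_flatten, pvZipStar_eq]
    simp [List.flatMap_def]

theorem pvSliceTD (cs : List (Int × Int)) (i : Nat) :
    PySem.List.slice cs none (some (i : Int)) ++ PySem.List.slice cs (some ((i : Int) + 1)) none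
      = cs.take i ++ cs.drop (i + 1) := by
  have h1 : ((i : Int) + 1) = (((i + 1 : Nat) : Int)) := by push_cast; ring
  rw [PySem.List.slice_to_natCast, h1, PySem.List.slice_from_natCast]

def pvKidsA (text : String) (cs : List (Int × Int)) (p : Int × (Int × Int)) : List (String × List (Int × Int)) :=
  let rest := cs.take p.1.toNat ++ cs.drop (p.1.toNat + 1)
  [(rotateA text p.2.1 p.2.2, rest), (rotateA text p.2.2 p.2.1, rest)]

theorem rrGoA_flat : ∀ (n : Nat) (text : String) (cs : List (Int × Int)) (i : Nat), cs.length - i ≤ n →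
    rrGoA text cs i = ((PySem.List.enumerate cs).drop i).flatMap
      (fun p => (pvKidsA text cs p).flatMap (fun e => e.1 :: recursive_rotate e.1 e.2)) := by
  intro n
  induction n with
  | zero =>
    intro text cs i h0
    rw [rrGoA, dif_neg (by omega), List.drop_eq_nil_of_le (by rw [PySem.List.length_enumerate]; omega)]
    rfl
  | succ n ih =>
    intro text cs i hn
    by_cases h : i < cs.length
    · rw [rrGoA]
      simp only [dif_pos h]
      have he : i < (PySem.List.enumerate cs).length := by rw [PySem.List.length_enumerate]; exact h
      rw [List.drop_eq_getElem_cons he, PySem.List.getElem_enumerate, List.flatMap_cons]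
      rw [pvSliceTD cs i, ih text cs (i + 1) (by omega)]
      simp only [pvKidsA, List.flatMap_cons, List.flatMap_nil, List.append_nil, Int.zero_add,
        Int.toNat_natCast, recursive_rotate, List.cons_append, List.append_assoc]
    · rw [rrGoA, dif_neg h, List.drop_eq_nil_of_le (by rw [PySem.List.length_enumerate]; omega)]
      rfl

theorem recursive_rotate_eq_flat (t : String) (cs : List (Int × Int)) :
    recursive_rotate t cs = (childrenB t cs).flatMap (fun e => e.1 :: recursive_rotate e.1 e.2) := by
  have h0 : recursive_rotate t cs = rrGoA t cs 0 := rfl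
  rw [h0, rrGoA_flat cs.length t cs 0 (by omega), List.drop_zero]
  unfold childrenB
  rw [List.flatMap_assoc]
  refine List.flatMap_congr ?_
  intro p hp
  rw [PySem.List.mem_enumerate_iff] at hp
  obtain ⟨k, hk, rfl⟩ := hp
  have hz : ((0 : Int) + (k : Nat)) = ((k : Nat) : Int) := by ring
  simp only [hz, pvKidsA, pvSliceTD, Int.toNat_natCast, rotate_eq]

theorem rrStack_flat (stack : List (String × List (Int × Int))) :
    rrStack stack = stack.flatMap (fun e => e.1 :: recursive_rotate e.1 e.2) := by
  induction stack using rrStack.induct with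
  | case1 => simp [rrStack]
  | case2 t rem rest ih =>
    rw [rrStack, ih, List.flatMap_append, ← recursive_rotate_eq_flat]
    simp

-- ===== VERDICT (by name: the statement is the Claim_ definition above) =====
theorem recursive_rotate_spec : Claim_equal_recursive_rotate := by
  intro ptext cs _
  unfold Spec_recursive_rotate recursive_rotate_alt
  rw [rrStack_flat, ← recursive_rotate_eq_flat]
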